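-- pv_equiv track=rewrite | github.com/zychen423/UHop | src/baseline_data_utility.py | _numericalize_str
-- ===== SOURCE A (Python) =====
-- def _numericalize_str(string, map2id, dilemeter):
--     strings = string.split('.')
--     string = ''
--     for i, s in enumerate(strings):
--         if i%3 == 0 and i > 0:
--             string += '..'
--         string += s
--     if len(dilemeter) == 2:
--         string = string.replace(dilemeter[1], dilemeter[0])
--     dilemeter = dilemeter[0]
--     tokens = string.strip().split(dilemeter)
--     tokens = [map2id[x] if x in map2id else map2id['<unk>'] for x in tokens]
--     return tokens
-- ===== SOURCE B (Python) =====
-- def _numericalize_str(string, map2id, dilemeter):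
--     parts = string.split('.')
--     chunks = [''.join(parts[i:i+3]) for i in range(0, len(parts), 3)]
--     s = '..'.join(chunks)
--     if len(dilemeter) == 2:
--         s = s.replace(dilemeter[1], dilemeter[0])
--     unk = map2id['<unk>']
--     return [map2id.get(t, unk) for t in s.strip().split(dilemeter[0])]
-- ===== Notes on version B (the rewrite author's own statement) =====
-- stated objective: alternative
-- what changed: B rebuilds the dot-joined string by slicing the split pieces into chunks of three and joining them ('..'.join of ''.join slices) instead of A's enumerate loop with an i%3 test and string accumulation, and maps tokens with dict.get and a precomputed '<unk>' id instead of A's per-token membership-test comprehension.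
-- outside the precondition, e.g. on _numericalize_str('a', {'a': 1}, ' '): A returns [1], B raises KeyError
import Mathlib
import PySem

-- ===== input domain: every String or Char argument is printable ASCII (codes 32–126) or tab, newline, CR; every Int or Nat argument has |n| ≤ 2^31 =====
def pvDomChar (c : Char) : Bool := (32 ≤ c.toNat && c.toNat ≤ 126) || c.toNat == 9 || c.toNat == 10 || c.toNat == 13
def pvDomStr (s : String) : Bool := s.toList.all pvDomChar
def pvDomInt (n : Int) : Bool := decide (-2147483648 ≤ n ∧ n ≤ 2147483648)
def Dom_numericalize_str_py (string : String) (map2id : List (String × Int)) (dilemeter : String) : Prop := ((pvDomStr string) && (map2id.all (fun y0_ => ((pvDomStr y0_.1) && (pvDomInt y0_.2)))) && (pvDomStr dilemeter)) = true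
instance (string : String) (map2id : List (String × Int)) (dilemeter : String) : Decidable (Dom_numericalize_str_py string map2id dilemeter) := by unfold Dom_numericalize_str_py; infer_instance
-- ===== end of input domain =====

-- B rebuilds the '..'-joined string from 3-chunks of the split (slice-and-join) instead of A's
-- index-modulo accumulation loop, and uses a dict lookup with a precomputed '<unk>' default
-- instead of a membership-test comprehension (objective: alternative decomposition, same cost).


-- ===== PORT A =====
-- Python 'a + b' on strings (exact: concatenation of the code-point lists)
def pvStrCat (a b : String) : String := String.ofList (a.toList ++ b.toList)

def numericalize_str_py (string : String) (map2id : List (String × Int)) (dilemeter : String) : List Int :=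
  let strings := (PySem.Str.split? string ".").getD []   -- sep "." is nonempty, so split? is always `some` (exact)
  let s1 := (PySem.List.enumerate strings).foldl
    (fun acc p => pvStrCat (if PySem.Int.mod p.1 3 = 0 ∧ 0 < p.1 then pvStrCat acc ".." else acc) p.2) ""
  match PySem.Str.pyGet? dilemeter 0 with
  | none => []        -- dilemeter[0]: IndexError on dilemeter = '' (excluded by Pre_)
  | some c0 =>
    let s2 := if PySem.Str.len dilemeter = 2 then
        match PySem.Str.pyGet? dilemeter 1 with
        | some c1 => PySem.Str.replace s1 (String.ofList [c1]) (String.ofList [c0])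
        | none => s1   -- unreachable: len dilemeter = 2 makes index 1 valid
      else s1
    let d := PySem.Dict.mk map2id
    let tokens := (PySem.Str.split? (PySem.Str.strip s2) (String.ofList [c0])).getD []  -- one-char sep ≠ "": always `some`
    tokens.map (fun x => if d.contains x then (d.get? x).getD 0 else (d.get? "<unk>").getD 0)
      -- map2id['<unk>'] raises KeyError when absent; Pre_ requires the key, so `.getD 0` is never read

-- ===== PORT B =====
def numericalize_str_py_alt (string : String) (map2id : List (String × Int)) (dilemeter : String) : List Int :=
  let parts := (PySem.Str.split? string ".").getD []     -- sep "." is nonempty, so split? is always `some` (exact)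
  let chunks := (PySem.List.pyRange 0 (parts.length : Int) 3).map
      (fun i => PySem.Str.join "" (PySem.List.slice parts (some i) (some (i + 3))))
  let s0 := PySem.Str.join ".." chunks
  match PySem.Str.pyGet? dilemeter 0 with
  | none => []        -- dilemeter[0]: IndexError on dilemeter = '' (excluded by Pre_)
  | some c0 =>
    let s1 := if PySem.Str.len dilemeter = 2 then
        match PySem.Str.pyGet? dilemeter 1 with
        | some c1 => PySem.Str.replace s0 (String.ofList [c1]) (String.ofList [c0])
        | none => s0   -- unreachable: len dilemeter = 2 makes index 1 valid
      else s0
    let d := PySem.Dict.mk map2id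
    match d.get? "<unk>" with
    | none => []      -- map2id['<unk>']: KeyError when absent (excluded by Pre_)
    | some unk =>
      ((PySem.Str.split? (PySem.Str.strip s1) (String.ofList [c0])).getD []).map
        (fun t => (d.get? t).getD unk)

-- ===== PRECONDITION & SPEC =====
-- Pre_ excludes dilemeter = '' (A raises IndexError) and maps without an '<unk>' key: there A
-- raises KeyError as soon as one token is unknown, and B's eager `unk = map2id['<unk>']` raises
-- even when every token is known (the one corner where A still returns, cited in the claim).
def Pre_numericalize_str_py (string : String) (map2id : List (String × Int)) (dilemeter : String) : Prop :=
  dilemeter ≠ "" ∧ (PySem.Dict.mk map2id).contains "<unk>" = true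
instance (string : String) (map2id : List (String × Int)) (dilemeter : String) : Decidable (Pre_numericalize_str_py string map2id dilemeter) := by unfold Pre_numericalize_str_py; infer_instance

def pvWitness_numericalize_str_py : String × (List (String × Int)) × String :=
  ("ab.c d", [("ab", 1), ("<unk>", 0)], " ")

def Spec_numericalize_str_py (string : String) (map2id : List (String × Int)) (dilemeter : String) (out : List Int) : Prop := out = numericalize_str_py_alt string map2id dilemeter
instance (string : String) (map2id : List (String × Int)) (dilemeter : String) (out : List Int) : Decidable (Spec_numericalize_str_py string map2id dilemeter out) := by unfold Spec_numericalize_str_py; infer_instance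

-- ===== CLAIM (what is proved, stated in full; the proofs are below) =====
def Claim_equal_numericalize_str_py : Prop := ∀ (string : String) (map2id : List (String × Int)) (dilemeter : String), Dom_numericalize_str_py string map2id dilemeter → Pre_numericalize_str_py string map2id dilemeter → Spec_numericalize_str_py string map2id dilemeter (numericalize_str_py string map2id dilemeter)

-- ===== LEMMAS AND PROOFS =====

-- the character stream A's accumulation loop appends for the suffix `l` starting at index `i`
def pvCharsOf : List String → Int → List Char
  | [], _ => []
  | x :: xs, i => (if PySem.Int.mod i 3 = 0 ∧ 0 < i then ['.', '.'] else []) ++ x.toList ++ pvCharsOf xs (i + 1)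

-- the split pieces grouped in threes (the chunking B performs with slices)
def pvChunks3 : List String → List (List String)
  | [] => []
  | [a] => [[a]]
  | [a, b] => [[a, b]]
  | a :: b :: c :: r => [a, b, c] :: pvChunks3 r

theorem pvA_loop (l : List String) (i : Int) (acc : String) :
    ((PySem.List.enumerate l i).foldl
      (fun acc p => pvStrCat (if PySem.Int.mod p.1 3 = 0 ∧ 0 < p.1 then pvStrCat acc ".." else acc) p.2) acc).toList
    = acc.toList ++ pvCharsOf l i := by
  induction l generalizing i acc with
  | nil => simp [pysem, pvCharsOf]
  | cons x xs ih =>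
    rw [PySem.List.enumerate_cons, List.foldl_cons, ih]
    by_cases h : PySem.Int.mod i 3 = 0 ∧ 0 < i
    · obtain ⟨h1, h2⟩ := h
      rw [PySem.Int.mod_eq_emod_of_pos (by norm_num)] at h1
      have hd : 3 ∣ i := by omega
      simp [pvCharsOf, pvStrCat, hd, h2]
    · have hn : ¬ (3 ∣ i ∧ 0 < i) := by
        rw [PySem.Int.mod_eq_emod_of_pos (by norm_num)] at h
        intro hc
        exact h ⟨by omega, hc.2⟩
      simp [pvCharsOf, pvStrCat, hn]

theorem pvCharsOf_shift (l : List String) (i j : Int) (hi : 0 < i) (hj : 0 < j)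
    (h : PySem.Int.mod i 3 = PySem.Int.mod j 3) : pvCharsOf l i = pvCharsOf l j := by
  induction l generalizing i j with
  | nil => rfl
  | cons x xs ih =>
    simp only [pvCharsOf]
    rw [PySem.Int.mod_eq_emod_of_pos (by norm_num), PySem.Int.mod_eq_emod_of_pos (by norm_num)] at h
    have hcond : (PySem.Int.mod i 3 = 0 ∧ 0 < i) ↔ (PySem.Int.mod j 3 = 0 ∧ 0 < j) := by
      rw [PySem.Int.mod_eq_emod_of_pos (by norm_num), PySem.Int.mod_eq_emod_of_pos (by norm_num)]
      omega
    have hrec : pvCharsOf xs (i + 1) = pvCharsOf xs (j + 1) := by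
      apply ih _ _ (by omega) (by omega)
      rw [PySem.Int.mod_eq_emod_of_pos (by norm_num), PySem.Int.mod_eq_emod_of_pos (by norm_num)]
      omega
    rw [hrec, if_congr hcond rfl rfl]

theorem pvCharsOf_three (l : List String) :
    pvCharsOf l 3 = (if l = [] then [] else ['.', '.']) ++ pvCharsOf l 0 := by
  cases l with
  | nil => rfl
  | cons x xs =>
    simp only [pvCharsOf]
    rw [if_pos (⟨by decide, by decide⟩ : PySem.Int.mod 3 3 = 0 ∧ (0:Int) < 3),
        if_neg (by decide : ¬ (PySem.Int.mod 0 3 = 0 ∧ (0:Int) < 0)),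
        if_neg (by simp : ¬ (x :: xs = [])),
        pvCharsOf_shift xs (3 + 1) (0 + 1) (by norm_num) (by norm_num) (by decide)]
    simp

theorem pvChunks3_cons (x : String) (xs : List String) : ∃ q qs, pvChunks3 (x :: xs) = q :: qs := by
  match xs with
  | [] => exact ⟨_, _, rfl⟩
  | [b] => exact ⟨_, _, rfl⟩
  | b :: c :: r => exact ⟨_, _, rfl⟩

theorem pvChunks3_join (l : List String) :
    PySem.Chars.join ['.', '.'] ((pvChunks3 l).map (fun g => PySem.Chars.join [] (g.map String.toList)))
    = pvCharsOf l 0 := by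
  induction l using pvChunks3.induct with
  | case1 =>
    simp [pvChunks3, pvCharsOf, PySem.Chars.join_nil]
  | case2 a =>
    simp [pvChunks3, pvCharsOf, PySem.Chars.join_singleton]
  | case3 a b =>
    simp [pvChunks3, pvCharsOf, PySem.Chars.join_singleton, PySem.Chars.join_cons_cons]
  | case4 a b c r ih =>
    have hrhs : pvCharsOf (a :: b :: c :: r) 0
        = a.toList ++ b.toList ++ c.toList ++ pvCharsOf r 3 := by
      simp only [pvCharsOf]
      rw [if_neg (by decide : ¬ (PySem.Int.mod 0 3 = 0 ∧ (0:Int) < 0)),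
          if_neg (by decide : ¬ (PySem.Int.mod (0+1) 3 = 0 ∧ (0:Int) < 0+1)),
          if_neg (by decide : ¬ (PySem.Int.mod (0+1+1) 3 = 0 ∧ (0:Int) < 0+1+1)),
          show (0:Int)+1+1+1 = 3 from by norm_num]
      simp
    rw [hrhs, pvCharsOf_three r]
    cases r with
    | nil =>
      simp [pvChunks3, PySem.Chars.join_singleton, PySem.Chars.join_cons_cons, pvCharsOf]
    | cons y ys =>
      obtain ⟨q, qs, hq⟩ := pvChunks3_cons y ys
      simp only [pvChunks3, List.map_cons]
      rw [hq] at ih ⊢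
      simp only [List.map_cons] at ih ⊢
      rw [PySem.Chars.join_cons_cons]
      rw [ih]
      simp [PySem.Chars.join_cons_cons, PySem.Chars.join_singleton]

theorem pvRangeChunks (l : List String) :
    (List.range ((l.length + 2) / 3)).map (fun k => (l.drop (3 * k)).take 3) = pvChunks3 l := by
  induction l using pvChunks3.induct with
  | case1 => rfl
  | case2 a =>
    simp [List.range_one, pvChunks3]
  | case3 a b =>
    simp [List.range_one, pvChunks3]
  | case4 a b c r ih =>
    have hlen : ((a :: b :: c :: r).length + 2) / 3 = (r.length + 2) / 3 + 1 := by
      simp only [List.length_cons]; omega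
    rw [hlen, List.range_succ_eq_map, List.map_cons, List.map_map]
    have htail : (List.range ((r.length + 2) / 3)).map
          ((fun k => ((a :: b :: c :: r).drop (3 * k)).take 3) ∘ Nat.succ)
        = (List.range ((r.length + 2) / 3)).map (fun k => (r.drop (3 * k)).take 3) := by
      apply List.map_congr_left
      intro k _
      simp only [Function.comp]
      have h3 : 3 * (k + 1) = (3 * k) + 1 + 1 + 1 := by ring
      simp [Nat.succ_eq_add_one, h3, List.drop_succ_cons]
    rw [htail, ih]
    simp [pvChunks3]

theorem pvChunks_slice (l : List String) :
    (PySem.List.pyRange 0 (l.length : Int) 3).map (fun i => PySem.List.slice l (some i) (some (i + 3)))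
    = pvChunks3 l := by
  rw [PySem.List.pyRange_of_pos 0 (l.length : Int) (by norm_num)]
  have hm : (if (0:Int) < (l.length : Int) then (((l.length : Int) - 0 + 3 - 1) / 3).toNat else 0)
      = (l.length + 2) / 3 := by
    split_ifs with h
    · omega
    · omega
  rw [hm, List.map_map]
  rw [show ((fun i => PySem.List.slice l (some i) (some (i + 3))) ∘ fun k : Nat => (0 : Int) + 3 * ↑k)
        = fun k : Nat => (l.drop (3 * k)).take 3 from ?_, pvRangeChunks]
  funext k
  simp only [Function.comp]
  have h2 : (0 + 3 * (k:Int) + 3) = ((3 * k : Nat) : Int) + ((3:Nat) : Int) := by push_cast; ring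
  have h1 : (0 + 3 * (k:Int)) = ((3 * k : Nat) : Int) := by push_cast; ring
  rw [h2, h1, PySem.List.slice_natCast_add]

theorem pvMid_eq (l : List String) :
    (PySem.List.enumerate l).foldl
      (fun acc p => pvStrCat (if PySem.Int.mod p.1 3 = 0 ∧ 0 < p.1 then pvStrCat acc ".." else acc) p.2) ""
    = PySem.Str.join ".." ((PySem.List.pyRange 0 (l.length : Int) 3).map
        (fun i => PySem.Str.join "" (PySem.List.slice l (some i) (some (i + 3))))) := by
  apply String.toList_inj.mp
  rw [pvA_loop l 0 ""]
  rw [PySem.Str.toList_join, List.map_map]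
  have hmap : (String.toList ∘ fun i => PySem.Str.join "" (PySem.List.slice l (some i) (some (i + 3))))
      = (fun g : List String => PySem.Chars.join [] (g.map String.toList)) ∘
        (fun i => PySem.List.slice l (some i) (some (i + 3))) := by
    funext i
    simp [PySem.Str.toList_join]
  rw [hmap, ← List.map_map, pvChunks_slice,
      show ("..".toList : List Char) = ['.', '.'] from by decide, pvChunks3_join]
  simp

theorem pvToken_eq (d : PySem.Dict String Int) (unk : Int) (x : String) :
    (if d.contains x then (d.get? x).getD 0 else unk) = (d.get? x).getD unk := by
  by_cases hc : d.contains x = true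
  · have hs : (d.get? x).isSome := by rw [← PySem.Dict.contains_eq_isSome_get?]; exact hc
    obtain ⟨v, hv⟩ := Option.isSome_iff_exists.mp hs
    simp [hc, hv]
  · have hn : d.get? x = none := by
      rw [PySem.Dict.contains_eq_isSome_get?] at hc
      exact Option.not_isSome_iff_eq_none.mp hc
    simp [hc, hn]

-- ===== VERDICT (by name: the statement is the Claim_ definition above) =====
theorem numericalize_str_py_spec : Claim_equal_numericalize_str_py := by
  intro string map2id dilemeter _hdom hpre
  obtain ⟨hd, hunkc⟩ := hpre
  unfold Spec_numericalize_str_py numericalize_str_py numericalize_str_py_alt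
  simp only []
  rw [pvMid_eq]
  obtain ⟨c0, hc0⟩ : ∃ c, PySem.Str.pyGet? dilemeter 0 = some c := by
    have hne : dilemeter.toList ≠ [] := by
      intro hh; apply hd; exact String.toList_inj.mp (by simp [hh])
    cases hl : dilemeter.toList with
    | nil => exact absurd hl hne
    | cons c cs =>
      refine ⟨c, ?_⟩
      rw [show (0:Int) = ((0:Nat):Int) from rfl, PySem.Str.pyGet?_natCast, hl]
      rfl
  rw [hc0]
  obtain ⟨unk, hunk⟩ : ∃ u, (PySem.Dict.mk map2id).get? "<unk>" = some u := by
    rw [PySem.Dict.contains_eq_isSome_get?] at hunkc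
    exact Option.isSome_iff_exists.mp hunkc
  simp only [hunk, Option.getD_some]
  exact List.map_congr_left (fun x _ => pvToken_eq _ unk x)
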